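-- pv_equiv track=rewrite | github.com/morganism42/ProjectEuler | #872 Recursive Tree/main.py | find
-- ===== SOURCE A (Python) =====
-- def find(bigboy, goal):
-- 	diff = bigboy - goal
-- 	diffl = reversed(bin(diff)[2:])
-- 	n = 1
-- 	value = bigboy
-- 	for i in diffl:
-- 		if i == '1':
-- 			bigboy -= n
-- 			value += bigboy
-- 		n *= 2
-- 	return value
-- ===== SOURCE B (Python) =====
-- def find(bigboy, goal):
--     # closed form: answer = (popcount(d)+1)*bigboy - sum of MSB-stripped remainders of d
--     d = abs(bigboy - goal)
--     s = 0
--     k = 0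
--     while d:
--         s += d
--         d -= 1 << (d.bit_length() - 1)
--         k += 1
--     return (k + 1) * bigboy - s
-- ===== Notes on version B (the rewrite author's own statement) =====
-- stated objective: alternative
-- what changed: Replaces the reversed-binary-string scan with a mutating bigboy/value/n state by a closed formula (popcount(d)+1)*bigboy - s, where s is computed by stripping the most-significant bit of |bigboy-goal| each iteration (MSB-first, no string conversion, no running power counter).
import Mathlib
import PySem

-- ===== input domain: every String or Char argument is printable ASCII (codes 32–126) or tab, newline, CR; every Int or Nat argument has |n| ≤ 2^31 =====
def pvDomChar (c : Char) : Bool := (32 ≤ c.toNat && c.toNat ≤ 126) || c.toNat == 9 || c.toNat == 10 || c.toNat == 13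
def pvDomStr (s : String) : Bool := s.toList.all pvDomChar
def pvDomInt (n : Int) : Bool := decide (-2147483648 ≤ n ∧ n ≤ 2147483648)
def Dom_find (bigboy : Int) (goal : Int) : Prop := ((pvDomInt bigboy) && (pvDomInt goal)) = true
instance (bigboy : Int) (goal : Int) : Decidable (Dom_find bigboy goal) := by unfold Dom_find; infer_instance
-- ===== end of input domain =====

-- B computes the same value by a closed formula over MSB-stripped remainders of |bigboy-goal|
-- instead of A's LSB-first scan of the reversed binary string with a mutating state (alternative).

-- ===== PORT A =====
-- binary digits of n, most-significant first ('bin(n)' without the '0b'); [] for n = 0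
def binDigitsA (n : Nat) : List Char :=
  if h : n = 0 then [] else binDigitsA (n / 2) ++ [if n % 2 = 1 then '1' else '0']
  decreasing_by exact Nat.div_lt_self (Nat.pos_of_ne_zero h) (by norm_num)

-- bin(d)[2:] : for d < 0 Python's '-0b…'[2:] keeps a leading 'b'; bin(0)[2:] = '0'
def binTail (d : Int) : List Char :=
  if d < 0 then 'b' :: binDigitsA d.natAbs
  else if d = 0 then ['0']
  else binDigitsA d.natAbs

-- the body of A's for-loop on the state (bigboy, n, value)
def findStep (st : Int × Int × Int) (i : Char) : Int × Int × Int :=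
  if i = '1' then (st.1 - st.2.1, st.2.1 * 2, st.2.2 + (st.1 - st.2.1))
  else (st.1, st.2.1 * 2, st.2.2)

def find (bigboy : Int) (goal : Int) : Int :=
  let diff := bigboy - goal
  let diffl := (binTail diff).reverse
  (diffl.foldl findStep (bigboy, 1, bigboy)).2.2

-- ===== PORT B =====
-- while d: s += d; d -= 1 << (d.bit_length() - 1); k += 1   (for d > 0, bit_length() - 1 = log2 d)
def stripLoop (d s k : Nat) : Nat × Nat :=
  if h : d = 0 then (s, k)
  else stripLoop (d - 2 ^ d.log2) (s + d) (k + 1)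
  decreasing_by exact Nat.sub_lt (Nat.pos_of_ne_zero h) (Nat.two_pow_pos _)

def find_alt (bigboy : Int) (goal : Int) : Int :=
  let d := (bigboy - goal).natAbs
  let sk := stripLoop d 0 0
  ((sk.2 : Int) + 1) * bigboy - (sk.1 : Int)

-- ===== PRECONDITION & SPEC =====
def Spec_find (bigboy : Int) (goal : Int) (out : Int) : Prop := out = find_alt bigboy goal
instance (bigboy : Int) (goal : Int) (out : Int) : Decidable (Spec_find bigboy goal out) := by unfold Spec_find; infer_instance

-- ===== CLAIM (what is proved, stated in full; the proofs are below) =====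
def Claim_equal_find : Prop := ∀ (bigboy : Int) (goal : Int), Dom_find bigboy goal → Spec_find bigboy goal (find bigboy goal)

-- ===== LEMMAS AND PROOFS =====

-- popcount of d, LSB recursion
def pc (d : Nat) : Nat :=
  if d = 0 then 0 else d % 2 + pc (d / 2)
  decreasing_by exact Nat.div_lt_self (Nat.pos_of_ne_zero (by assumption)) (by norm_num)

-- sum of the prefix sums of the bit values of d, LSB recursion
def psum (d : Nat) : Nat :=
  if d = 0 then 0
  else if d % 2 = 1 then 1 + pc (d / 2) + 2 * psum (d / 2) else 2 * psum (d / 2)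
  decreasing_by all_goals exact Nat.div_lt_self (Nat.pos_of_ne_zero (by assumption)) (by norm_num)

theorem pc_zero : pc 0 = 0 := by rw [pc]; norm_num
theorem psum_zero : psum 0 = 0 := by rw [psum]; norm_num
theorem pc_eq (d : Nat) (h : d ≠ 0) : pc d = d % 2 + pc (d / 2) := by rw [pc]; simp [h]
theorem psum_eq (d : Nat) (h : d ≠ 0) :
    psum d = if d % 2 = 1 then 1 + pc (d / 2) + 2 * psum (d / 2) else 2 * psum (d / 2) := by
  rw [psum]; simp [h]

theorem log2_half (d : Nat) (h : 2 ≤ d) : d.log2 = (d / 2).log2 + 1 := by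
  rw [Nat.log2_eq_log_two, Nat.log2_eq_log_two, Nat.log_div_base]
  have := Nat.log_pos (b := 2) (by norm_num) h
  omega

theorem binDigitsA_zero : binDigitsA 0 = [] := by rw [binDigitsA]; norm_num
theorem binDigitsA_eq (n : Nat) (h : n ≠ 0) :
    binDigitsA n = binDigitsA (n / 2) ++ [if n % 2 = 1 then '1' else '0'] := by
  rw [binDigitsA]; simp [h]

theorem strip_pc_psum : ∀ d : Nat, d ≠ 0 →
    pc d = 1 + pc (d - 2 ^ d.log2) ∧ psum d = d + psum (d - 2 ^ d.log2) := by
  intro d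
  induction d using Nat.strong_induction_on with
  | _ d ih =>
    intro hd
    by_cases h2 : d < 2
    · have h1 : d = 1 := by omega
      subst h1
      have hl : Nat.log2 1 = 0 := by rw [Nat.log2_eq_log_two]; simp
      rw [hl]
      norm_num
      rw [pc_eq 1 (by omega), psum_eq 1 (by omega)]
      simp [pc_zero, psum_zero]
    · have hlog := log2_half d (by omega)
      have hle' : 2 ^ (d / 2).log2 ≤ d / 2 := Nat.log2_self_le (by omega)
      have hpow : (2 : Nat) ^ d.log2 = 2 * 2 ^ (d / 2).log2 := by rw [hlog, pow_succ]; ring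
      have hdiv : (d - 2 ^ d.log2) / 2 = d / 2 - 2 ^ (d / 2).log2 := by omega
      have hmod : (d - 2 ^ d.log2) % 2 = d % 2 := by omega
      obtain ⟨ihpc, ihps⟩ := ih (d / 2) (by omega) (by omega)
      constructor
      · have e1 : pc d = d % 2 + pc (d / 2) := pc_eq d (by omega)
        by_cases hz : d - 2 ^ d.log2 = 0
        · have hz2 : d / 2 - 2 ^ (d / 2).log2 = 0 := by omega
          rw [e1, ihpc, hz2, hz, pc_zero]
          omega
        · have e3 : pc (d - 2 ^ d.log2) = d % 2 + pc (d / 2 - 2 ^ (d / 2).log2) := by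
            rw [pc_eq _ hz, hdiv, hmod]
          rw [e1, ihpc, e3]
          omega
      · have e1 : psum d = if d % 2 = 1 then 1 + pc (d / 2) + 2 * psum (d / 2)
            else 2 * psum (d / 2) := psum_eq d (by omega)
        by_cases hz : d - 2 ^ d.log2 = 0
        · have hz2 : d / 2 - 2 ^ (d / 2).log2 = 0 := by omega
          rw [e1, ihps, hz2, hz, psum_zero]
          by_cases hodd : d % 2 = 1
          · exfalso; omega
          · rw [if_neg hodd]; omega
        · have e3 : psum (d - 2 ^ d.log2) =
              if d % 2 = 1 then 1 + pc (d / 2 - 2 ^ (d / 2).log2) + 2 * psum (d / 2 - 2 ^ (d / 2).log2)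
              else 2 * psum (d / 2 - 2 ^ (d / 2).log2) := by
            rw [psum_eq _ hz, hdiv, hmod]
          rw [e1, ihps, e3, ihpc]
          by_cases hodd : d % 2 = 1
          · rw [if_pos hodd, if_pos hodd]; omega
          · rw [if_neg hodd, if_neg hodd]; omega

theorem stripLoop_eq : ∀ d s k : Nat, stripLoop d s k = (s + psum d, k + pc d) := by
  intro d
  induction d using Nat.strong_induction_on with
  | _ d ih =>
    intro s k
    rw [stripLoop]
    by_cases hd : d = 0
    · simp [hd, psum_zero, pc_zero]
    · have hlt : d - 2 ^ d.log2 < d := Nat.sub_lt (Nat.pos_of_ne_zero hd) (Nat.two_pow_pos _)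
      obtain ⟨hpc, hps⟩ := strip_pc_psum d hd
      simp only [hd, dite_false, ih _ hlt]
      rw [hpc, hps]
      simp only [Prod.mk.injEq]
      refine ⟨by omega, by omega⟩

-- the fold over the LSB-first digit list of d > 0, fully characterised
theorem fold_binDigits : ∀ d : Nat, d ≠ 0 → ∀ bb n val : Int,
    (binDigitsA d).reverse.foldl findStep (bb, n, val)
      = (bb - n * d, n * 2 ^ (binDigitsA d).length,
         val + (pc d : Int) * bb - n * (psum d : Int)) := by
  intro d
  induction d using Nat.strong_induction_on with
  | _ d ih =>
    intro hd bb n val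
    rw [binDigitsA_eq d hd, List.reverse_append, List.reverse_singleton, List.singleton_append,
      List.foldl_cons, List.length_append, List.length_singleton]
    by_cases hodd : d % 2 = 1
    · have hstep : findStep (bb, n, val) (if d % 2 = 1 then '1' else '0')
          = (bb - n, n * 2, val + (bb - n)) := by
        rw [if_pos hodd]; simp [findStep]
      rw [hstep, pc_eq d hd, psum_eq d hd, if_pos hodd]
      by_cases hz : d / 2 = 0
      · have h1 : d = 1 := by omega
        subst h1
        rw [binDigitsA_zero]
        simp [pc_zero, psum_zero]
        ring
      · rw [ih (d / 2) (by omega) hz]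
        have hdd : (d : Int) = 2 * ((d / 2 : Nat) : Int) + 1 := by
          have : d = 2 * (d / 2) + 1 := by omega
          exact_mod_cast congrArg (Nat.cast : Nat → Int) this
        simp only [Prod.mk.injEq]
        refine ⟨by rw [hdd]; push_cast; ring, by ring, by push_cast [hodd]; ring⟩
    · have hstep : findStep (bb, n, val) (if d % 2 = 1 then '1' else '0')
          = (bb, n * 2, val) := by
        rw [if_neg hodd]; simp [findStep]
      have hz : d / 2 ≠ 0 := by omega
      rw [hstep, pc_eq d hd, psum_eq d hd, if_neg hodd, ih (d / 2) (by omega) hz]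
      have hdd : (d : Int) = 2 * ((d / 2 : Nat) : Int) := by
        have : d = 2 * (d / 2) := by omega
        exact_mod_cast congrArg (Nat.cast : Nat → Int) this
      simp only [Prod.mk.injEq]
      have hm0 : d % 2 = 0 := by omega
      refine ⟨by rw [hdd]; push_cast; ring, by ring, by push_cast [hm0]; ring⟩

-- ===== VERDICT (by name: the statement is the Claim_ definition above) =====
theorem find_spec : Claim_equal_find := by
  intro bigboy goal _
  unfold Spec_find find find_alt
  rcases lt_trichotomy (bigboy - goal) 0 with hneg | hzero | hpos
  · have hd : (bigboy - goal).natAbs ≠ 0 := by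
      simp only [ne_eq, Int.natAbs_eq_zero]; omega
    simp only [binTail, if_pos hneg, List.reverse_cons, List.foldl_append,
      fold_binDigits _ hd, stripLoop_eq]
    simp [findStep]
    ring
  · simp only [binTail, hzero, Int.natAbs_zero, stripLoop_eq]
    norm_num [findStep, pc_zero, psum_zero]
    rw [if_neg (by decide : ¬ ('0' = '1'))]
  · have hd : (bigboy - goal).natAbs ≠ 0 := by
      simp only [ne_eq, Int.natAbs_eq_zero]; omega
    simp only [binTail, if_neg (by omega : ¬ bigboy - goal < 0),
      if_neg (by omega : ¬ bigboy - goal = 0), fold_binDigits _ hd, stripLoop_eq]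
    simp
    ring
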